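-- pv_equiv track=rewrite | github.com/MadhavanVasu/DSA | CodeForces/A/GamingForces.py | findMinSpells
-- ===== SOURCE A (Python) =====
-- def findMinSpells(n, arr):
--     count1 = 0
--     count2 = 0
--     for i in arr:
--         if(i==1):
--             count1+=1
--         else:
--             count2+=1
--     return (count1//2 + count1%2 + count2)
-- ===== SOURCE B (Python) =====
-- def findMinSpells(n, arr):
--     # Greedy pairing state machine: pair up 1-HP creatures as they arrive
--     # (one spell per completed pair), one spell per stronger creature,
--     # plus one final spell if a 1 is left unpaired.
--     spells = 0
--     pending = False
--     for x in arr: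
--         if x == 1:
--             if pending:
--                 spells += 1
--                 pending = False
--             else:
--                 pending = True
--         else:
--             spells += 1
--     return spells + pending
-- ===== Notes on version B (the rewrite author's own statement) =====
-- stated objective: alternative
-- what changed: Replaces A's count-then-arithmetic approach with a greedy pairing state machine: a single pass with a pending flag that pairs consecutive 1s (one spell per completed pair), adds a spell per non-1, and one trailing spell for a leftover unpaired 1, never computing counts or divisions.
import Mathlib
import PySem

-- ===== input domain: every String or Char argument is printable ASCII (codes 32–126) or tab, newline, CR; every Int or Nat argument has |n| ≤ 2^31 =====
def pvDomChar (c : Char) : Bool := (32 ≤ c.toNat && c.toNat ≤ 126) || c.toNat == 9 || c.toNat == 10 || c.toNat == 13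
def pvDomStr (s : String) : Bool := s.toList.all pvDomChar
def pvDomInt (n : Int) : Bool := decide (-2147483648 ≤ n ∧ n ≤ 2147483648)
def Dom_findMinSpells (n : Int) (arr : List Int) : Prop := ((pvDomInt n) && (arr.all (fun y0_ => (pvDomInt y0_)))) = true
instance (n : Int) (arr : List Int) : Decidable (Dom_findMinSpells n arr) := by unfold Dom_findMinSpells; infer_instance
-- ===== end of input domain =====

-- B replaces A's two-counter-and-divide computation with a greedy pairing state machine over the list (alternative algorithm, same cost); equivalence proved for all inputs.


-- ===== PORT A =====
def findMinSpells (n : Int) (arr : List Int) : Int :=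
  let cs := arr.foldl (fun (c : Int × Int) i =>
    if i == 1 then (c.1 + 1, c.2) else (c.1, c.2 + 1)) (0, 0)
  PySem.Int.floordiv cs.1 2 + PySem.Int.mod cs.1 2 + cs.2

-- ===== PORT B =====
def findMinSpells_alt (n : Int) (arr : List Int) : Int :=
  let r := arr.foldl (fun (c : Int × Bool) x =>
    if x == 1 then
      (if c.2 then (c.1 + 1, false) else (c.1, true))
    else (c.1 + 1, c.2)) (0, false)
  r.1 + (if r.2 then 1 else 0)

-- ===== PRECONDITION & SPEC =====
def Spec_findMinSpells (n : Int) (arr : List Int) (out : Int) : Prop := out = findMinSpells_alt n arr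
instance (n : Int) (arr : List Int) (out : Int) : Decidable (Spec_findMinSpells n arr out) := by unfold Spec_findMinSpells; infer_instance

-- ===== CLAIM (what is proved, stated in full; the proofs are below) =====
def Claim_equal_findMinSpells : Prop := ∀ (n : Int) (arr : List Int), Dom_findMinSpells n arr → Spec_findMinSpells n arr (findMinSpells n arr)

-- ===== LEMMAS AND PROOFS =====

-- A's fold counts 1s and non-1s.
theorem findMinSpells_fold_char (arr : List Int) (a b : Int) :
    arr.foldl (fun (c : Int × Int) i =>
      if i == 1 then (c.1 + 1, c.2) else (c.1, c.2 + 1)) (a, b)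
    = (a + (arr.count 1 : Int), b + ((arr.length : Int) - arr.count 1)) := by
  induction arr generalizing a b with
  | nil => simp
  | cons x xs ih =>
    simp only [List.foldl_cons]
    rcases eq_or_ne x 1 with h | h
    · rw [if_pos (by simp [h] : (x == 1) = true), ih]
      subst h
      simp only [List.count_cons_self, List.length_cons, Prod.mk.injEq]
      constructor <;> · push_cast; omega
    · rw [if_neg (by simp [h] : ¬ (x == 1) = true), ih]
      simp only [List.count_cons, List.length_cons, Prod.mk.injEq, beq_iff_eq]
      rw [if_neg h]
      constructor <;> · push_cast; omega

-- B's pairing fold characterised by the number of 1s and the incoming pending flag.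
theorem findMinSpells_altfold_char (arr : List Int) (s : Int) (p : Bool) :
    arr.foldl (fun (c : Int × Bool) x =>
      if x == 1 then
        (if c.2 then (c.1 + 1, false) else (c.1, true))
      else (c.1 + 1, c.2)) (s, p)
    = (s + ((((arr.count 1 + (if p then 1 else 0)) / 2 : Nat)) : Int)
          + ((arr.length : Int) - arr.count 1),
       decide ((arr.count 1 + (if p then 1 else 0)) % 2 = 1)) := by
  induction arr generalizing s p with
  | nil => cases p <;> simp
  | cons x xs ih =>
    simp only [List.foldl_cons]
    rcases eq_or_ne x 1 with h | h
    · rw [if_pos (by simp [h] : (x == 1) = true)]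
      subst h
      cases p with
      | false =>
        simp only [ih, List.count_cons_self, List.length_cons, Prod.mk.injEq,
          Bool.false_eq_true, if_false, if_true, Nat.add_zero]
        exact ⟨by omega, trivial⟩
      | true =>
        simp only [ih, List.count_cons_self, List.length_cons, Prod.mk.injEq,
          Bool.false_eq_true, if_false, if_true, Nat.add_zero]
        exact ⟨by omega, decide_eq_decide.mpr (by omega)⟩
    · rw [if_neg (by simp [h] : ¬ (x == 1) = true), ih]
      have hc : List.count 1 (x :: xs) = List.count 1 xs := by
        simp [h]
      simp only [hc, List.length_cons, Prod.mk.injEq]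
      exact ⟨by omega, trivial⟩

-- ===== VERDICT (by name: the statement is the Claim_ definition above) =====
theorem findMinSpells_spec : Claim_equal_findMinSpells := by
  intro n arr _
  unfold Spec_findMinSpells findMinSpells findMinSpells_alt
  simp only [findMinSpells_fold_char, findMinSpells_altfold_char, zero_add,
    Bool.false_eq_true, if_false, Nat.add_zero, decide_eq_true_eq]
  simp only [PySem.Int.floordiv, PySem.Int.mod]
  rw [Int.fdiv_eq_ediv, Int.fmod_eq_emod]
  by_cases hp : arr.count 1 % 2 = 1
  · rw [if_pos hp]; omega
  · rw [if_neg hp]; omega
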